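-- pv_equiv track=rewrite | github.com/JoshBarber2023/Abstraction-and-Reasoning-Corpus---Classification-Method | utils/rule_helpers.py | get_bounding_box_area
-- ===== SOURCE A (Python) =====
-- def get_bounding_box_area(obj):
--     # obj: list of (color, location) tuples; location assumed to be (x, y)
--     locations = [loc for _, loc in obj]
--     if not locations:
--         return 0
--     xs, ys = zip(*locations)
--     width = max(xs) - min(xs) + 1
--     height = max(ys) - min(ys) + 1
--     return width * height
-- ===== SOURCE B (Python) =====
-- def _bbox(obj):
--     # bounding box (min_x, max_x, min_y, max_y) of a nonempty slice, by divide and conquer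
--     if len(obj) == 1:
--         _, loc = obj[0]
--         x, y = loc
--         return (x, x, y, y)
--     mid = len(obj) // 2
--     l = _bbox(obj[:mid])
--     r = _bbox(obj[mid:])
--     return (min(l[0], r[0]), max(l[1], r[1]), min(l[2], r[2]), max(l[3], r[3]))
--
-- def get_bounding_box_area(obj):
--     # Divide and conquer: recursively merge the bounding boxes of the two halves.
--     if not obj:
--         return 0
--     min_x, max_x, min_y, max_y = _bbox(obj)
--     return (max_x - min_x + 1) * (max_y - min_y + 1)
-- ===== Notes on version B (the rewrite author's own statement) =====
-- stated objective: alternative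
-- what changed: Replaces A's zip-transpose plus four builtin min/max scans with a divide-and-conquer recursion that splits the list in halves, computes each half's bounding box and merges the two boxes.
import Mathlib
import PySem

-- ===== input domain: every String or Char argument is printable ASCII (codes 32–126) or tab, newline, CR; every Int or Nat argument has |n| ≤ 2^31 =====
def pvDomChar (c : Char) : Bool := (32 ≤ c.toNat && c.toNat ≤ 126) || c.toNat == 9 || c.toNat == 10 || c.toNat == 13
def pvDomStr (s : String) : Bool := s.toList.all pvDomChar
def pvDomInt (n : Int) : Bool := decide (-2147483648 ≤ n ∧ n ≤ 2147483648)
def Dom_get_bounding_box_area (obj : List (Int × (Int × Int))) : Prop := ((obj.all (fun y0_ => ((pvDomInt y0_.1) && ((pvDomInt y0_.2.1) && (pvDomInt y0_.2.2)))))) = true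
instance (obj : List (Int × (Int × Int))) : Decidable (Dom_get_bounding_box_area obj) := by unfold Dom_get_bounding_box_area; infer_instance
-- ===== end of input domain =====

-- B replaces A's zip-transpose plus four builtin min/max scans by a divide-and-conquer
-- recursion that merges the bounding boxes of the two halves; objective: alternative algorithm.

-- ===== PORT A =====
-- locations = [loc for _, loc in obj]; if empty return 0; xs, ys = zip(*locations);
-- (max(xs)-min(xs)+1)*(max(ys)-min(ys)+1).  max/min on the provably nonempty tuples are
-- PySem.List.max?/min? with identity key; getD 0 is unreachable (list nonempty).
def get_bounding_box_area (obj : List (Int × (Int × Int))) : Int :=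
  let locations := obj.map Prod.snd
  if locations.isEmpty then 0
  else
    let xs := locations.map Prod.fst
    let ys := locations.map Prod.snd
    let width := (PySem.List.max? xs (fun v => v)).getD 0 - (PySem.List.min? xs (fun v => v)).getD 0 + 1
    let height := (PySem.List.max? ys (fun v => v)).getD 0 - (PySem.List.min? ys (fun v => v)).getD 0 + 1
    width * height

-- ===== PORT B =====
-- _bbox of Source B: divide and conquer on the list, merging the two halves' boxes.
-- Python only ever calls _bbox on nonempty slices; the [] branch below never arises
-- in get_bounding_box_area_alt and only makes the Lean function total.
def bboxDC (obj : List (Int × (Int × Int))) : Int × Int × Int × Int :=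
  if _h : obj.length ≤ 1 then
    match obj with
    | [] => (0, 0, 0, 0)
    | (_, (x, y)) :: _ => (x, x, y, y)
  else
    let mid := obj.length / 2
    let l := bboxDC (obj.take mid)
    let r := bboxDC (obj.drop mid)
    (min l.1 r.1, max l.2.1 r.2.1, min l.2.2.1 r.2.2.1, max l.2.2.2 r.2.2.2)
termination_by obj.length
decreasing_by
  · simp only [List.length_take]; omega
  · simp only [List.length_drop]; omega

def get_bounding_box_area_alt (obj : List (Int × (Int × Int))) : Int :=
  match obj with
  | [] => 0
  | _ :: _ =>
    let b := bboxDC obj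
    (b.2.1 - b.1 + 1) * (b.2.2.2 - b.2.2.1 + 1)

-- ===== PRECONDITION & SPEC =====
def Spec_get_bounding_box_area (obj : List (Int × (Int × Int))) (out : Int) : Prop := out = get_bounding_box_area_alt obj
instance (obj : List (Int × (Int × Int))) (out : Int) : Decidable (Spec_get_bounding_box_area obj out) := by unfold Spec_get_bounding_box_area; infer_instance

-- ===== CLAIM (what is proved, stated in full; the proofs are below) =====
def Claim_equal_get_bounding_box_area : Prop := ∀ (obj : List (Int × (Int × Int))), Dom_get_bounding_box_area obj → Spec_get_bounding_box_area obj (get_bounding_box_area obj)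

-- ===== LEMMAS AND PROOFS =====

-- proof-only: one-pass fold characterisation of a nonempty list's bounding box
def boxStep (b : Int × Int × Int × Int) (p : Int × (Int × Int)) : Int × Int × Int × Int :=
  (min b.1 p.2.1, max b.2.1 p.2.1, min b.2.2.1 p.2.2, max b.2.2.2 p.2.2)

def boxMerge (l r : Int × Int × Int × Int) : Int × Int × Int × Int :=
  (min l.1 r.1, max l.2.1 r.2.1, min l.2.2.1 r.2.2.1, max l.2.2.2 r.2.2.2)

def boxOf : List (Int × (Int × Int)) → Int × Int × Int × Int
  | [] => (0, 0, 0, 0)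
  | (_, (x, y)) :: rest => rest.foldl boxStep (x, x, y, y)

lemma foldl_boxStep_merge (A B : Int × Int × Int × Int) (l : List (Int × (Int × Int))) :
    l.foldl boxStep (boxMerge A B) = boxMerge A (l.foldl boxStep B) := by
  induction l generalizing B with
  | nil => rfl
  | cons p t ih =>
      have : boxStep (boxMerge A B) p = boxMerge A (boxStep B p) := by
        simp [boxStep, boxMerge, min_assoc, max_assoc]
      simp [List.foldl_cons, this, ih]

lemma boxOf_append (l1 l2 : List (Int × (Int × Int))) (h1 : l1 ≠ []) (h2 : l2 ≠ []) :
    boxOf (l1 ++ l2) = boxMerge (boxOf l1) (boxOf l2) := by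
  obtain ⟨⟨c1, x1, y1⟩, r1, rfl⟩ := List.exists_cons_of_ne_nil h1
  obtain ⟨⟨c2, x2, y2⟩, r2, rfl⟩ := List.exists_cons_of_ne_nil h2
  show (r1 ++ (c2, x2, y2) :: r2).foldl boxStep (x1, x1, y1, y1) = _
  rw [List.foldl_append]
  have hstep : boxStep (r1.foldl boxStep (x1, x1, y1, y1)) (c2, x2, y2)
      = boxMerge (r1.foldl boxStep (x1, x1, y1, y1)) (x2, x2, y2, y2) := by
    simp [boxStep, boxMerge]
  simp only [List.foldl_cons, hstep, foldl_boxStep_merge]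
  rfl

lemma bboxDC_eq_boxOf_aux : ∀ (n : Nat) (obj : List (Int × (Int × Int))),
    obj.length ≤ n → obj ≠ [] → bboxDC obj = boxOf obj := by
  intro n
  induction n with
  | zero =>
      intro obj hlen hne
      cases obj with
      | nil => exact absurd rfl hne
      | cons p t => simp at hlen
  | succ n ih =>
      intro obj hlen hne
      by_cases hle : obj.length ≤ 1
      · obtain ⟨⟨c, x, y⟩, rest, rfl⟩ := List.exists_cons_of_ne_nil hne
        have hrest : rest = [] := by
          cases rest with
          | nil => rfl
          | cons a b => simp [List.length_cons] at hle
        subst hrest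
        rw [bboxDC]
        simp [boxOf]
      · have htk : obj.take (obj.length / 2) ≠ [] := by
          simp only [ne_eq, ← List.length_pos_iff, List.length_take]; omega
        have hdr : obj.drop (obj.length / 2) ≠ [] := by
          simp only [ne_eq, ← List.length_pos_iff, List.length_drop]; omega
        have htkl : (obj.take (obj.length / 2)).length ≤ n := by
          simp only [List.length_take]; omega
        have hdrl : (obj.drop (obj.length / 2)).length ≤ n := by
          simp only [List.length_drop]; omega
        rw [bboxDC]
        simp only [dif_neg hle]
        rw [ih _ htkl htk, ih _ hdrl hdr]
        have h2 := boxOf_append (obj.take (obj.length / 2)) (obj.drop (obj.length / 2)) htk hdr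
        rw [List.take_append_drop] at h2
        rw [show ∀ (A B : Int × Int × Int × Int),
              (min A.1 B.1, max A.2.1 B.2.1, min A.2.2.1 B.2.2.1, max A.2.2.2 B.2.2.2)
                = boxMerge A B from fun A B => rfl]
        exact h2.symm

lemma bboxDC_eq_boxOf (obj : List (Int × (Int × Int))) (h : obj ≠ []) :
    bboxDC obj = boxOf obj :=
  bboxDC_eq_boxOf_aux obj.length obj le_rfl h

lemma foldl_boxStep_components (rest : List (Int × (Int × Int))) :
    ∀ (a b c d : Int), rest.foldl boxStep (a, b, c, d) =
      ((rest.map (fun p => p.2.1)).foldl min a, (rest.map (fun p => p.2.1)).foldl max b,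
       (rest.map (fun p => p.2.2)).foldl min c, (rest.map (fun p => p.2.2)).foldl max d) := by
  induction rest with
  | nil => intro a b c d; rfl
  | cons p t ih =>
      intro a b c d
      obtain ⟨cc, x, y⟩ := p
      simp [boxStep, List.foldl_cons, ih]

-- ===== VERDICT (by name: the statement is the Claim_ definition above) =====
theorem get_bounding_box_area_spec : Claim_equal_get_bounding_box_area := by
  intro obj _
  unfold Spec_get_bounding_box_area
  match obj with
  | [] => rfl
  | (c, (x, y)) :: rest =>
      show get_bounding_box_area _ =
        (let b := bboxDC ((c, (x, y)) :: rest); (b.2.1 - b.1 + 1) * (b.2.2.2 - b.2.2.1 + 1))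
      rw [bboxDC_eq_boxOf _ (by simp)]
      show get_bounding_box_area _ =
        (let b := rest.foldl boxStep (x, x, y, y); (b.2.1 - b.1 + 1) * (b.2.2.2 - b.2.2.1 + 1))
      rw [foldl_boxStep_components]
      simp [get_bounding_box_area, PySem.List.max?_id_cons, PySem.List.min?_id_cons,
            List.map_map, Function.comp_def]
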